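-- pv_equiv track=rewrite | github.com/Glasssparrow/hoi4_economy | quick_test.py | add_quotes
-- ===== SOURCE A (Python) =====
-- def is_text(letter):
--     if letter.isalpha():
--         return True
--     elif letter == "_":
--         return True
--     else:
--         return False
--
-- def add_quotes(string, maximum_phrases=20):
--     """Добавляем кавычки тексту, чтобы python распознавал его."""
--     # Исправляем названия dlc
--     string = string.replace(
--         "Arms Against Tyranny",
--         "Arms_Against_Tyranny",
--     )
--     text = []
--     for x in range(maximum_phrases):
--         text.append([None, None])
--     # Находим фразы
--     for x in range(len(string)-1):
--         # Избегание кавычек нужно для того,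
--         # чтобы оставить название с номером.
--         if (
--             (not is_text(string[x]) and not string[x].isdigit())
--             and is_text(string[x+1])
--             and string[x] != '"' and string[x+1] != '"'
--         ):
--             for y in range(maximum_phrases):
--                 if not text[y][0] is None:
--                     continue
--                 text[y][0] = x+1
--                 break
--         if (
--             is_text(string[x]) and
--             (not is_text(string[x+1]) and not string[x+1].isdigit())
--             and string[x] != '"' and string[x+1] != '"'
--         ):
--             for y in range(maximum_phrases):
--                 if text[y][1]:
--                     continue
--                 text[y][1] = x+1
--                 break
--     # Берем в кавычки полностью найденные фразы.
--     for phrase in reversed(text):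
--         if phrase[0] and phrase[1]:
--             string = (
--                     string[:phrase[0]] + '"' +
--                     string[phrase[0]:phrase[1]] + '"' +
--                     string[phrase[1]:]
--             )
--     return string
-- ===== SOURCE B (Python) =====
-- def _cls(c):
--     """4-way character class: 0=word (letter/underscore), 1=digit, 2=quote, 3=other."""
--     if c.isalpha() or c == "_":
--         return 0
--     if c.isdigit():
--         return 1
--     if c == '"':
--         return 2
--     return 3
--
--
-- def add_quotes(string, maximum_phrases=20):
--     """Tokenize into maximal class runs, derive phrase boundaries from run
--     transitions (other->word starts a phrase, word->other ends one), then splice."""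
--     string = string.replace(
--         "Arms Against Tyranny",
--         "Arms_Against_Tyranny",
--     )
--     # Pass 1: run-length tokenization into (class, start_index) runs.
--     runs = []
--     prev = None
--     for i, ch in enumerate(string):
--         k = _cls(ch)
--         if k != prev:
--             runs.append((k, i))
--             prev = k
--     # Pass 2: phrase boundaries are exactly the run transitions other->word / word->other.
--     starts = []
--     ends = []
--     for (c1, _), (c2, i) in zip(runs, runs[1:]):
--         if c1 == 3 and c2 == 0:
--             starts.append(i)
--         elif c1 == 0 and c2 == 3:
--             ends.append(i)
--     m = max(maximum_phrases, 0)
--     for a, b in reversed(list(zip(starts[:m], ends[:m]))):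
--         string = string[:a] + '"' + string[a:b] + '"' + string[b:]
--     return string
-- ===== Notes on version B (the rewrite author's own statement) =====
-- stated objective: alternative
-- what changed: A tests six boolean conditions on every adjacent character pair and stores each hit by scanning a preallocated maximum_phrases-slot table for the first free slot; B instead run-length tokenizes the string under a 4-way character classification and reads the phrase boundaries off the run transitions (other->word / word->other), capping by list slicing.
import Mathlib
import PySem

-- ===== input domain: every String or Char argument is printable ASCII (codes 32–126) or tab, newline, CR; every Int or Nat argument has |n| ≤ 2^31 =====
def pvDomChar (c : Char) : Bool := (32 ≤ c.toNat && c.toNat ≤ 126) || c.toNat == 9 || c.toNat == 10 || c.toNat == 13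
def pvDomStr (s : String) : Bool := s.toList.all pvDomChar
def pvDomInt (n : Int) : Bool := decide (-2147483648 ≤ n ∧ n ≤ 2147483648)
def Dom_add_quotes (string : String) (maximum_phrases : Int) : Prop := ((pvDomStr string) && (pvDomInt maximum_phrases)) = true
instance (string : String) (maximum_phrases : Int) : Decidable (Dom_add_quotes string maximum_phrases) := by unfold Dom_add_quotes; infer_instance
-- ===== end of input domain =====

-- B replaces A's adjacent-pair predicate scan with slot-table insertion by a run-length
-- tokenization under a 4-way character classification whose run transitions give the
-- phrase boundaries; same return value everywhere (objective: alternative).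

-- ===== PORT A =====
def is_text (letter : Char) : Bool :=
  if PySem.Chars.isalpha letter then true
  else if letter = '_' then true
  else false

-- Python truthiness of an Optional[int] cell: None and 0 are falsy
def pvTruthy (o : Option Int) : Bool :=
  match o with
  | none => false
  | some v => v != 0

-- "for y in range(maximum_phrases): if not text[y][0] is None: continue; text[y][0] = v; break"
def pvSetStart (v : Int) : List (Option Int × Option Int) → List (Option Int × Option Int)
  | [] => []
  | (a, b) :: rest => if a.isSome then (a, b) :: pvSetStart v rest else (some v, b) :: rest

-- "for y in range(maximum_phrases): if text[y][1]: continue; text[y][1] = v; break"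
def pvSetEnd (v : Int) : List (Option Int × Option Int) → List (Option Int × Option Int)
  | [] => []
  | (a, b) :: rest => if pvTruthy b then (a, b) :: pvSetEnd v rest else (a, some v) :: rest

-- the body of A's scan loop over x
def pvStepA (l : List Char) (t : List (Option Int × Option Int)) (x : Int) :
    List (Option Int × Option Int) :=
  let c := PySem.List.pyGetD l x ' '      -- string[x]  (x always in range on the visited x)
  let d := PySem.List.pyGetD l (x + 1) ' ' -- string[x+1]
  let t1 := if (!is_text c && !PySem.Chars.isdigit c) && is_text d && c != '"' && d != '"'
    then pvSetStart (x + 1) t else t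
  if is_text c && (!is_text d && !PySem.Chars.isdigit d) && c != '"' && d != '"'
    then pvSetEnd (x + 1) t1 else t1

def add_quotes (string : String) (maximum_phrases : Int) : String :=
  let l := PySem.Chars.replace string.toList
      "Arms Against Tyranny".toList "Arms_Against_Tyranny".toList
  let text := (PySem.List.pyRange 0 maximum_phrases 1).foldl
      (fun t _ => t ++ [((none : Option Int), (none : Option Int))]) []
  let text := (PySem.List.pyRange 0 ((l.length : Int) - 1) 1).foldl (pvStepA l) text
  let res := text.reverse.foldl (fun s ph =>
      if pvTruthy ph.1 && pvTruthy ph.2 then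
        PySem.List.slice s none ph.1 ++ ['"'] ++ PySem.List.slice s ph.1 ph.2
          ++ ['"'] ++ PySem.List.slice s ph.2 none
      else s) l
  String.ofList res

-- ===== PORT B =====
-- _cls: 0=word (letter/underscore), 1=digit, 2=quote, 3=other
def pvCls (c : Char) : Nat :=
  if PySem.Chars.isalpha c || c == '_' then 0
  else if PySem.Chars.isdigit c then 1
  else if c == '"' then 2
  else 3

-- body of B's run-length tokenization loop: state = (runs, prev)
def pvRunStep (st : List (Nat × Int) × Option Nat) (e : Int × Char) :
    List (Nat × Int) × Option Nat :=
  let k := pvCls e.2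
  if some k = st.2 then st else (st.1 ++ [(k, e.1)], some k)

-- body of B's transition loop over zip(runs, runs[1:])
def pvEvStep (acc : List Int × List Int) (p : (Nat × Int) × (Nat × Int)) :
    List Int × List Int :=
  if p.1.1 = 3 ∧ p.2.1 = 0 then (acc.1 ++ [p.2.2], acc.2)
  else if p.1.1 = 0 ∧ p.2.1 = 3 then (acc.1, acc.2 ++ [p.2.2])
  else acc

def add_quotes_alt (string : String) (maximum_phrases : Int) : String :=
  let l := PySem.Chars.replace string.toList
      "Arms Against Tyranny".toList "Arms_Against_Tyranny".toList
  let runs := ((PySem.List.enumerate l 0).foldl pvRunStep ([], none)).1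
  let se := (runs.zip runs.tail).foldl pvEvStep ([], [])
  let m : Int := max maximum_phrases 0
  let pairs := (PySem.List.slice se.1 none (some m)).zip (PySem.List.slice se.2 none (some m))
  let res := pairs.reverse.foldl (fun s p =>
      PySem.List.slice s none (some p.1) ++ ['"'] ++ PySem.List.slice s (some p.1) (some p.2)
        ++ ['"'] ++ PySem.List.slice s (some p.2) none) l
  String.ofList res

-- ===== PRECONDITION & SPEC =====
def Spec_add_quotes (string : String) (maximum_phrases : Int) (out : String) : Prop := out = add_quotes_alt string maximum_phrases
instance (string : String) (maximum_phrases : Int) (out : String) : Decidable (Spec_add_quotes string maximum_phrases out) := by unfold Spec_add_quotes; infer_instance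

-- ===== CLAIM (what is proved, stated in full; the proofs are below) =====
def Claim_equal_add_quotes : Prop := ∀ (string : String) (maximum_phrases : Int), Dom_add_quotes string maximum_phrases → Spec_add_quotes string maximum_phrases (add_quotes string maximum_phrases)

-- ===== LEMMAS AND PROOFS =====

-- word-character predicate (proof-side shorthand; pvCls c = 0 ↔ _is_word c)
def _is_word (c : Char) : Bool := PySem.Chars.isalpha c || c == '_'

-- A's slot table as a function of the two event lists
def pvSlots (S E : List Int) : Nat → List (Option Int × Option Int)
  | 0 => []
  | m + 1 => (S.head?, E.head?) :: pvSlots S.tail E.tail m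

-- intermediate: A's two recordings per scanned pair, as a fold step over event lists
def pvStepE (acc : List Int × List Int) (e : Int × (Char × Char)) : List Int × List Int :=
  let pos := e.1
  let prev := e.2.1
  let cur := e.2.2
  if prev != '"' && cur != '"' then
    let pw := _is_word prev
    let cw := _is_word cur
    let acc1 := if cw && !pw && !PySem.Chars.isdigit prev then (acc.1 ++ [pos], acc.2) else acc
    if pw && !cw && !PySem.Chars.isdigit cur then (acc1.1, acc1.2 ++ [pos]) else acc1
  else acc

-- common reference: event recording dispatched on the two character classes
def pvClsStep (acc : List Int × List Int) (pos : Int) (ka kb : Nat) : List Int × List Int :=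
  if ka = 3 ∧ kb = 0 then (acc.1 ++ [pos], acc.2)
  else if ka = 0 ∧ kb = 3 then (acc.1, acc.2 ++ [pos])
  else acc

-- common reference: events of adjacent character pairs, position = index of the second char
def adjEv : List Char → Int → List Int × List Int → List Int × List Int
  | a :: b :: cs, i, acc => adjEv (b :: cs) (i + 1) (pvClsStep acc i (pvCls a) (pvCls b))
  | _, _, acc => acc

theorem pvSlots_nil (m : Nat) : pvSlots [] [] m = List.replicate m (none, none) := by
  induction m with
  | zero => rfl
  | succ m ih => simp [pvSlots, ih, List.replicate_succ]

theorem pvSetStart_slots (S E : List Int) (m : Nat) (v : Int) :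
    pvSetStart v (pvSlots S E m) = pvSlots (S ++ [v]) E m := by
  induction m generalizing S E with
  | zero => rfl
  | succ m ih =>
    cases S with
    | nil => simp [pvSlots, pvSetStart]
    | cons a S' => simp [pvSlots, pvSetStart, ih]

theorem pvSetEnd_slots (S E : List Int) (m : Nat) (v : Int)
    (hE : ∀ x ∈ E, x ≠ 0) :
    pvSetEnd v (pvSlots S E m) = pvSlots S (E ++ [v]) m := by
  induction m generalizing S E with
  | zero => rfl
  | succ m ih =>
    cases E with
    | nil => simp [pvSlots, pvSetEnd, pvTruthy]
    | cons b E' =>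
      have hb : b ≠ 0 := hE b (by simp)
      simp [pvSlots, pvSetEnd, pvTruthy, hb,
        ih S.tail E' (fun x hx => hE x (by simp [hx]))]

-- A's is_text and the classifier's word test agree
theorem is_text_eq (c : Char) : is_text c = _is_word c := by
  simp only [is_text, _is_word]
  cases PySem.Chars.isalpha c <;> simp
  exact (Bool.beq_eq_decide_eq c '_').symm

-- the per-step correspondence between A's table update and the event-list step
theorem pvStep_eq (l : List Char) (S E : List Int) (m : Nat) (k : Nat)
    (hk : k + 1 < l.length) (hE : ∀ x ∈ E, x ≠ 0) :
    pvStepA l (pvSlots S E m) (k : Int) =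
      pvSlots (pvStepE (S, E) ((k : Int) + 1, (l[k], l[k + 1]))).1
              (pvStepE (S, E) ((k : Int) + 1, (l[k], l[k + 1]))).2 m := by
  have hk' : k < l.length := by omega
  have hcast : ((k : Int) + 1) = ((k + 1 : Nat) : Int) := by push_cast; ring
  simp only [pvStepA, pvStepE, is_text_eq, hcast, PySem.List.pyGetD_natCast,
    List.getD_eq_getElem _ _ hk', List.getD_eq_getElem _ _ hk]
  cases hw1 : _is_word l[k] <;> cases hw2 : _is_word l[k + 1] <;>
  cases hd1 : PySem.Chars.isdigit l[k] <;> cases hd2 : PySem.Chars.isdigit l[k + 1] <;>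
  cases hg1 : l[k] == '"' <;> cases hg2 : l[k + 1] == '"' <;>
  simp [pvSetStart_slots, pvSetEnd_slots S E m _ hE] <;>
  split_ifs <;> simp_all

-- what pvStepE can add to either event list
theorem pvStepE_mem1 (acc : List Int × List Int) (e : Int × (Char × Char)) (x : Int)
    (hx : x ∈ (pvStepE acc e).1) : x ∈ acc.1 ∨ x = e.1 := by
  simp only [pvStepE] at hx
  split_ifs at hx <;> (try simp at hx) <;> tauto

theorem pvStepE_mem2 (acc : List Int × List Int) (e : Int × (Char × Char)) (x : Int)
    (hx : x ∈ (pvStepE acc e).2) : x ∈ acc.2 ∨ x = e.1 := by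
  simp only [pvStepE] at hx
  split_ifs at hx <;> (try simp at hx) <;> tauto

-- scan prefixes correspond (with the events-are-nonzero invariant)
theorem pvScan_aux (l : List Char) (m : Nat) :
    ∀ k, k ≤ l.length - 1 →
    (PySem.List.pyRange 0 (k : Int) 1).foldl (pvStepA l) (pvSlots [] [] m) =
      pvSlots (((PySem.List.enumerate (l.zip l.tail) 1).take k).foldl pvStepE ([], [])).1
              (((PySem.List.enumerate (l.zip l.tail) 1).take k).foldl pvStepE ([], [])).2 m ∧
    (∀ x ∈ (((PySem.List.enumerate (l.zip l.tail) 1).take k).foldl pvStepE ([], [])).1, x ≠ 0) ∧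
    (∀ x ∈ (((PySem.List.enumerate (l.zip l.tail) 1).take k).foldl pvStepE ([], [])).2, x ≠ 0) := by
  intro k
  induction k with
  | zero =>
    intro _
    simp [PySem.List.pyRange_one_eq_nil]
  | succ k ih =>
    intro hk1
    have hk2 : k + 1 < l.length := by omega
    have hlen : (PySem.List.enumerate (l.zip l.tail) 1).length = l.length - 1 := by
      simp [PySem.List.length_enumerate, List.length_zip]
    have hkL : k < (PySem.List.enumerate (l.zip l.tail) 1).length := by omega
    obtain ⟨ihEq, ihS, ihE⟩ := ih (by omega)
    have hcast : ((k + 1 : Nat) : Int) = (k : Int) + 1 := by push_cast; ring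
    have hentry : (PySem.List.enumerate (l.zip l.tail) 1)[k] =
        ((k : Int) + 1, (l[k]'(by omega), l[k + 1])) := by
      rw [PySem.List.getElem_enumerate]
      have hz : k < (l.zip l.tail).length := by simp [List.length_zip, List.length_tail]; omega
      rw [List.getElem_zip]
      congr 1
      · omega
      · congr 1
        exact List.getElem_tail _
    rw [hcast, PySem.List.pyRange_one_succ_right (by positivity),
      List.take_succ_eq_append_getElem hkL, List.foldl_append, List.foldl_append, hentry]
    simp only [List.foldl_cons, List.foldl_nil]
    refine ⟨?_, ?_, ?_⟩
    · rw [ihEq]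
      rw [← Prod.mk.eta
        (p := ((PySem.List.enumerate (l.zip l.tail) 1).take k).foldl pvStepE ([], []))]
      exact pvStep_eq l _ _ m k hk2 ihE
    · intro x hx
      rcases pvStepE_mem1 _ _ _ hx with h | h
      · exact ihS x h
      · simp at h; omega
    · intro x hx
      rcases pvStepE_mem2 _ _ _ hx with h | h
      · exact ihE x h
      · simp at h; omega

-- scan equality, plus: all recorded events are nonzero
theorem pvScan_eq (l : List Char) (m : Nat) :
    (PySem.List.pyRange 0 ((l.length : Int) - 1) 1).foldl (pvStepA l) (pvSlots [] [] m) =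
      pvSlots ((PySem.List.enumerate (l.zip l.tail) 1).foldl pvStepE ([], [])).1
              ((PySem.List.enumerate (l.zip l.tail) 1).foldl pvStepE ([], [])).2 m ∧
    (∀ x ∈ ((PySem.List.enumerate (l.zip l.tail) 1).foldl pvStepE ([], [])).1, x ≠ 0) ∧
    (∀ x ∈ ((PySem.List.enumerate (l.zip l.tail) 1).foldl pvStepE ([], [])).2, x ≠ 0) := by
  cases l with
  | nil => simp [PySem.List.pyRange_one_eq_nil, PySem.List.enumerate_nil]
  | cons c l0 =>
    have h := pvScan_aux (c :: l0) m ((c :: l0).length - 1) (le_refl _)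
    have htake : ((PySem.List.enumerate ((c :: l0).zip (c :: l0).tail) 1).take
        ((c :: l0).length - 1)) = PySem.List.enumerate ((c :: l0).zip (c :: l0).tail) 1 := by
      apply List.take_of_length_le
      simp [PySem.List.length_enumerate, List.length_zip]
    have hcast : (((c :: l0).length : Int) - 1) = (((c :: l0).length - 1 : Nat) : Int) := by
      simp
    rw [hcast]
    rw [htake] at h
    exact h

-- class facts
theorem pvCls_word (c : Char) (h : _is_word c = true) : pvCls c = 0 := by
  simp only [_is_word] at h
  simp [pvCls, h]

theorem pvCls_digit (c : Char) (h1 : _is_word c = false) (h2 : PySem.Chars.isdigit c = true) :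
    pvCls c = 1 := by
  simp only [_is_word] at h1
  simp [pvCls, h1, h2]

theorem pvCls_other (c : Char) (h1 : _is_word c = false) (h2 : PySem.Chars.isdigit c = false)
    (h3 : (c == '"') = false) : pvCls c = 3 := by
  simp only [_is_word] at h1
  simp [pvCls, h1, h2, h3]

-- one recording step of A's scan, dispatched on the two character classes
theorem pvStepE_eq_clsStep (acc : List Int × List Int) (pos : Int) (a b : Char) :
    pvStepE acc (pos, (a, b)) = pvClsStep acc pos (pvCls a) (pvCls b) := by
  by_cases ha : a = '"'
  · subst ha
    have h2 : pvCls '"' = 2 := by decide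
    simp [pvStepE, pvClsStep, h2]
  · by_cases hb : b = '"'
    · subst hb
      have h2 : pvCls '"' = 2 := by decide
      simp [pvStepE, pvClsStep, h2]
    · have haq : (a == '"') = false := by simpa using ha
      have hbq : (b == '"') = false := by simpa using hb
      cases haw : _is_word a <;> cases hbw : _is_word b <;>
      cases had : PySem.Chars.isdigit a <;> cases hbd : PySem.Chars.isdigit b <;>
      simp [pvStepE, pvClsStep, haq, hbq, haw, hbw, had, hbd,
        pvCls_word, pvCls_digit, pvCls_other] <;>
      (intro hcontra; exact absurd (hcontra ha) hb)

-- A's event fold over adjacent pairs is adjEv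
theorem pvFoldE_eq_adjEv (cs : List Char) :
    ∀ (i : Int) (acc : List Int × List Int),
    (PySem.List.enumerate (cs.zip cs.tail) i).foldl pvStepE acc = adjEv cs i acc := by
  induction cs with
  | nil => intro i acc; simp [PySem.List.enumerate_nil, adjEv]
  | cons a t ih =>
    intro i acc
    cases t with
    | nil => simp [PySem.List.enumerate_nil, adjEv]
    | cons b cs' =>
      have hz : (a :: b :: cs').zip (a :: b :: cs').tail =
          (a, b) :: (b :: cs').zip (b :: cs').tail := by simp
      rw [hz, PySem.List.enumerate_cons, List.foldl_cons, pvStepE_eq_clsStep, ih (i + 1)]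
      rfl

-- B's run tokenization, as a structural recursion (reference form of the foldl)
def runsF : List Char → Int → Option Nat → List (Nat × Int)
  | [], _, _ => []
  | c :: cs, i, pr =>
    if some (pvCls c) = pr then runsF cs (i + 1) pr
    else (pvCls c, i) :: runsF cs (i + 1) (some (pvCls c))

-- the prev state after B's tokenization loop
def pvPrevAfter : List Char → Option Nat → Option Nat
  | [], pr => pr
  | c :: cs, _ => pvPrevAfter cs (some (pvCls c))

theorem pvRunFold_eq (cs : List Char) :
    ∀ (i : Int) (rs : List (Nat × Int)) (pr : Option Nat),
    (PySem.List.enumerate cs i).foldl pvRunStep (rs, pr) =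
      (rs ++ runsF cs i pr, pvPrevAfter cs pr) := by
  induction cs with
  | nil => intro i rs pr; simp [PySem.List.enumerate_nil, runsF, pvPrevAfter]
  | cons c cs ih =>
    intro i rs pr
    rw [PySem.List.enumerate_cons, List.foldl_cons]
    by_cases h : some (pvCls c) = pr
    · have hstep : pvRunStep (rs, pr) (i, c) = (rs, pr) := by
        simp [pvRunStep, h]
      rw [hstep, ih, runsF]
      rw [if_pos h]
      subst h
      rfl
    · have hstep : pvRunStep (rs, pr) (i, c) = (rs ++ [(pvCls c, i)], some (pvCls c)) := by
        simp [pvRunStep, h]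
      rw [hstep, ih, runsF, if_neg h]
      simp [pvPrevAfter]

-- B's transition fold over the runs of (a :: cs) is adjEv, given the head run's class is cls a
theorem pvEvFold_runsF (cs : List Char) :
    ∀ (i : Int) (a : Char) (r : Nat × Int) (acc : List Int × List Int), r.1 = pvCls a →
    (((r :: runsF cs i (some (pvCls a))).zip (runsF cs i (some (pvCls a)))).foldl
        pvEvStep acc) = adjEv (a :: cs) i acc := by
  induction cs with
  | nil => intro i a r acc _; simp [runsF, adjEv]
  | cons b cs' ih =>
    intro i a r acc hr
    by_cases h : pvCls b = pvCls a
    · have hskip : runsF (b :: cs') i (some (pvCls a)) = runsF cs' (i + 1) (some (pvCls a)) := by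
        rw [runsF, if_pos (by rw [h])]
      have hstep : pvClsStep acc i (pvCls a) (pvCls b) = acc := by
        simp only [pvClsStep]
        rw [h]
        split_ifs with h1 h2
        · omega
        · omega
        · rfl
      have ihh := ih (i + 1) b r acc (by rw [hr, h])
      rw [hskip, ← h, ihh]
      show adjEv (b :: cs') (i + 1) acc =
        adjEv (b :: cs') (i + 1) (pvClsStep acc i (pvCls a) (pvCls b))
      rw [hstep]
    · have hnew : runsF (b :: cs') i (some (pvCls a)) =
          (pvCls b, i) :: runsF cs' (i + 1) (some (pvCls b)) := by
        rw [runsF, if_neg (by simpa using h)]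
      rw [hnew]
      have hzip : ((r :: (pvCls b, i) :: runsF cs' (i + 1) (some (pvCls b))).zip
            ((pvCls b, i) :: runsF cs' (i + 1) (some (pvCls b)))) =
          (r, (pvCls b, i)) ::
            (((pvCls b, i) :: runsF cs' (i + 1) (some (pvCls b))).zip
              (runsF cs' (i + 1) (some (pvCls b)))) := by
        simp
      rw [hzip, List.foldl_cons]
      have hstep : pvEvStep acc (r, (pvCls b, i)) = pvClsStep acc i (pvCls a) (pvCls b) := by
        simp [pvEvStep, pvClsStep, hr]
      rw [hstep, ih (i + 1) b (pvCls b, i) _ rfl]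
      rfl

-- B's whole front end equals adjEv from position 1
theorem pvRuns_events_eq (l : List Char) :
    (((((PySem.List.enumerate l 0).foldl pvRunStep ([], none)).1).zip
        (((PySem.List.enumerate l 0).foldl pvRunStep ([], none)).1).tail).foldl
      pvEvStep ([], [])) = adjEv l 1 ([], []) := by
  cases l with
  | nil => simp [PySem.List.enumerate_nil, adjEv]
  | cons a cs =>
    rw [pvRunFold_eq]
    have h0 : runsF (a :: cs) 0 none = (pvCls a, 0) :: runsF cs (0 + 1) (some (pvCls a)) := by
      rw [runsF, if_neg (by simp)]
    simp only [List.nil_append, h0, List.tail_cons]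
    have := pvEvFold_runsF cs (0 + 1) a (pvCls a, 0) ([], []) rfl
    norm_num at this ⊢
    exact this

-- final build equality
theorem pvBuild_eq (S E : List Int) (m : Nat) (acc : List Char)
    (hS : ∀ x ∈ S, x ≠ 0) (hE : ∀ x ∈ E, x ≠ 0) :
    (pvSlots S E m).reverse.foldl (fun s ph =>
      if pvTruthy ph.1 && pvTruthy ph.2 then
        PySem.List.slice s none ph.1 ++ ['"'] ++ PySem.List.slice s ph.1 ph.2
          ++ ['"'] ++ PySem.List.slice s ph.2 none
      else s) acc =
    ((S.take m).zip (E.take m)).reverse.foldl (fun s p =>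
      PySem.List.slice s none (some p.1) ++ ['"'] ++ PySem.List.slice s (some p.1) (some p.2)
        ++ ['"'] ++ PySem.List.slice s (some p.2) none) acc := by
  induction m generalizing S E acc with
  | zero => simp [pvSlots]
  | succ m ih =>
    cases S with
    | nil =>
      simp only [pvSlots, List.reverse_cons, List.foldl_append, List.head?_nil, List.tail_nil]
      rw [ih [] E.tail acc (by simp) (fun x hx => hE x (List.mem_of_mem_tail hx))]
      simp [pvTruthy]
    | cons a S' =>
      cases E with
      | nil =>
        simp only [pvSlots, List.reverse_cons, List.foldl_append, List.head?_nil,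
          List.head?_cons, List.tail_nil, List.tail_cons]
        rw [ih S' [] acc (fun x hx => hS x (List.mem_of_mem_tail hx)) (by simp)]
        simp [pvTruthy]
      | cons b E' =>
        have ha : a ≠ 0 := hS a (by simp)
        have hb : b ≠ 0 := hE b (by simp)
        simp only [pvSlots, List.reverse_cons, List.foldl_append, List.head?_cons,
          List.tail_cons, List.take_succ_cons, List.zip_cons_cons]
        rw [ih S' E' acc (fun x hx => hS x (List.mem_of_mem_tail hx))
          (fun x hx => hE x (List.mem_of_mem_tail hx))]
        simp [pvTruthy, ha, hb]

-- A's slot-table initialisation is replicate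
theorem pvInit_eq (mp : Int) :
    (PySem.List.pyRange 0 mp 1).foldl
      (fun t _ => t ++ [((none : Option Int), (none : Option Int))]) [] =
    pvSlots [] [] mp.toNat := by
  rw [PySem.List.foldl_append_singleton_eq_map (f := fun _ => ((none : Option Int), none)),
    pvSlots_nil]
  simp [PySem.List.length_pyRange_one]

-- ===== VERDICT (by name: the statement is the Claim_ definition above) =====
theorem add_quotes_spec : Claim_equal_add_quotes := by
  intro string mp _
  simp only [Spec_add_quotes, add_quotes, add_quotes_alt]
  obtain ⟨hEq, hS, hE⟩ := pvScan_eq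
    (PySem.Chars.replace string.toList "Arms Against Tyranny".toList
      "Arms_Against_Tyranny".toList) mp.toNat
  rw [pvInit_eq, hEq,
    pvBuild_eq _ _ _ _ hS hE,
    PySem.List.slice_to _ (le_max_right mp 0), PySem.List.slice_to _ (le_max_right mp 0)]
  rw [pvRuns_events_eq, ← pvFoldE_eq_adjEv]
  have hm : (max mp 0).toNat = mp.toNat := by omega
  rw [hm]
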